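-- pv_equiv track=rewrite | github.com/btrkeks/transcoda | scripts/dataset_generation/dataset_generation/verovio_diagnostics.py | _iter_error_blocks
-- ===== SOURCE A (Python) =====
-- _ERROR_PREFIX = "Error:"
--
-- def _iter_error_blocks(stderr_text: str) -> list[list[str]]:
--     lines = [line.rstrip() for line in stderr_text.replace("\r\n", "\n").split("\n")]
--     blocks: list[list[str]] = []
--     current: list[str] = []
--
--     for line in lines:
--         if not line:
--             if current:
--                 blocks.append(current)
--                 current = []
--             continue
--         if line.startswith(_ERROR_PREFIX):
--             if current:
--                 blocks.append(current)
--             current = [line]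
--             continue
--         if current:
--             current.append(line)
--
--     if current:
--         blocks.append(current)
--     return blocks
-- ===== SOURCE B (Python) =====
-- _ERROR_PREFIX = "Error:"
--
--
-- def _segments(para):
--     """Error-prefixed segments of one blank-free paragraph; leading non-error lines are dropped."""
--     segs = []
--     seg = None
--     for ln in para:
--         if ln.startswith(_ERROR_PREFIX):
--             if seg is not None:
--                 segs.append(seg)
--             seg = [ln]
--         elif seg is not None:
--             seg.append(ln)
--     if seg is not None:
--         segs.append(seg)
--     return segs
--
--
-- def _iter_error_blocks(stderr_text: str) -> list[list[str]]:
--     lines = [ln.rstrip() for ln in stderr_text.replace("\r\n", "\n").split("\n")]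
--     # pass 1: partition into paragraphs (maximal runs of non-blank lines)
--     paragraphs = []
--     para = []
--     for ln in lines:
--         if ln:
--             para.append(ln)
--         elif para:
--             paragraphs.append(para)
--             para = []
--     if para:
--         paragraphs.append(para)
--     # pass 2: each paragraph contributes its error segments, in order
--     blocks = []
--     for p in paragraphs:
--         blocks.extend(_segments(p))
--     return blocks
-- ===== Notes on version B (the rewrite author's own statement) =====
-- stated objective: alternative
-- what changed: Replaces A's single flat loop with mixed block/blank/error state by a two-phase decomposition: first partition the rstripped lines into blank-separated paragraphs, then extract the error-prefixed segments of each paragraph independently.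
import Mathlib
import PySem

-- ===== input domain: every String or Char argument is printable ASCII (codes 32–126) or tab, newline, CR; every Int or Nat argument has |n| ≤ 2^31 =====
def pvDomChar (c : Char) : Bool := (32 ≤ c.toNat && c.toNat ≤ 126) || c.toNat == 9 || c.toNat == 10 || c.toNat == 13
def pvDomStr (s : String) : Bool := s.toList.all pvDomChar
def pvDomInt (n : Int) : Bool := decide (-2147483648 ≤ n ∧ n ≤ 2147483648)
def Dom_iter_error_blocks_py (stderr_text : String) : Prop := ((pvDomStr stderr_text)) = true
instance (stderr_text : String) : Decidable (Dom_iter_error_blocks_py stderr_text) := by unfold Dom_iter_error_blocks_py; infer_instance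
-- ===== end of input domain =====

-- B replaces A's single stateful loop by a two-phase decomposition (split into blank-separated
-- paragraphs, then extract error segments per paragraph); alternative structure, same cost.

-- ===== PORT A =====
-- the for-loop of A over (blocks, current)
def loopA : List String → List (List String) → List String → List (List String) × List String
  | [], blocks, current => (blocks, current)
  | l :: ls, blocks, current =>
    if l = "" then
      if current = [] then loopA ls blocks current
      else loopA ls (blocks ++ [current]) []
    else if PySem.Str.startswith l "Error:" then
      if current = [] then loopA ls blocks [l]
      else loopA ls (blocks ++ [current]) [l]
    else
      if current = [] then loopA ls blocks current
      else loopA ls blocks (current ++ [l])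

def iter_error_blocks_py (stderr_text : String) : List (List String) :=
  let lines := ((PySem.Str.split? (PySem.Str.replace stderr_text "\r\n" "\n") "\n").getD []).map PySem.Str.rstrip
  match loopA lines [] [] with
  | (blocks, current) => if current = [] then blocks else blocks ++ [current]

-- ===== PORT B =====
-- inner loop of B's _segments over (segs, seg); seg = none is Python's `seg is None`
def segLoopB : List String → List (List String) → Option (List String) → List (List String) × Option (List String)
  | [], segs, seg => (segs, seg)
  | l :: ls, segs, seg =>
    if PySem.Str.startswith l "Error:" then
      match seg with
      | none => segLoopB ls segs (some [l])
      | some s => segLoopB ls (segs ++ [s]) (some [l])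
    else
      match seg with
      | none => segLoopB ls segs none
      | some s => segLoopB ls segs (some (s ++ [l]))

def segmentsB (para : List String) : List (List String) :=
  match segLoopB para [] none with
  | (segs, none) => segs
  | (segs, some s) => segs ++ [s]

-- pass 1 of B: paragraph partition loop over (paragraphs, para)
def paraLoopB : List String → List (List String) → List String → List (List String) × List String
  | [], ps, para => (ps, para)
  | l :: ls, ps, para =>
    if l ≠ "" then paraLoopB ls ps (para ++ [l])
    else if para = [] then paraLoopB ls ps para
    else paraLoopB ls (ps ++ [para]) []

def paragraphsB (lines : List String) : List (List String) :=
  match paraLoopB lines [] [] with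
  | (ps, para) => if para = [] then ps else ps ++ [para]

def iter_error_blocks_py_alt (stderr_text : String) : List (List String) :=
  let lines := ((PySem.Str.split? (PySem.Str.replace stderr_text "\r\n" "\n") "\n").getD []).map PySem.Str.rstrip
  (paragraphsB lines).foldl (fun bs p => bs ++ segmentsB p) []

-- ===== PRECONDITION & SPEC =====
def Spec_iter_error_blocks_py (stderr_text : String) (out : List (List String)) : Prop := out = iter_error_blocks_py_alt stderr_text
instance (stderr_text : String) (out : List (List String)) : Decidable (Spec_iter_error_blocks_py stderr_text out) := by unfold Spec_iter_error_blocks_py; infer_instance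

-- ===== CLAIM (what is proved, stated in full; the proofs are below) =====
def Claim_equal_iter_error_blocks_py : Prop := ∀ (stderr_text : String), Dom_iter_error_blocks_py stderr_text → Spec_iter_error_blocks_py stderr_text (iter_error_blocks_py stderr_text)

-- ===== LEMMAS AND PROOFS =====

-- the common finishing step `if current: blocks.append(current)` of both loops
def finishP (p : List (List String) × List String) : List (List String) :=
  if p.2 = [] then p.1 else p.1 ++ [p.2]

-- reference recursion: the blocks still to be produced from the remaining lines, given the open block
def sRec : List String → List String → List (List String)
  | [], cur => if cur = [] then [] else [cur]
  | l :: ls, cur =>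
    if l = "" then
      if cur = [] then sRec ls [] else cur :: sRec ls []
    else if PySem.Str.startswith l "Error:" then
      if cur = [] then sRec ls [l] else cur :: sRec ls [l]
    else
      if cur = [] then sRec ls [] else sRec ls (cur ++ [l])

lemma loopA_spec (ls : List String) : ∀ (bs : List (List String)) (cur : List String),
    finishP (loopA ls bs cur) = bs ++ sRec ls cur := by
  induction ls with
  | nil =>
    intro bs cur
    by_cases h : cur = [] <;> simp [loopA, sRec, finishP, h]
  | cons l ls ih =>
    intro bs cur
    by_cases hl : l = ""
    · by_cases hc : cur = [] <;> simp [loopA, sRec, hl, hc, ih]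
    · by_cases he : PySem.Str.startswith l "Error:" = true
      · have he' : PySem.Chars.startswith l.toList ['E', 'r', 'r', 'o', 'r', ':'] = true := by simpa using he
        by_cases hc : cur = [] <;> simp [loopA, sRec, hl, he', hc, ih]
      · have he' : PySem.Chars.startswith l.toList ['E', 'r', 'r', 'o', 'r', ':'] = false := by
          simpa using he
        by_cases hc : cur = [] <;> simp [loopA, sRec, hl, he', hc, ih]

lemma segLoopB_append (xs ys : List String) : ∀ segs seg,
    segLoopB (xs ++ ys) segs seg
      = segLoopB ys (segLoopB xs segs seg).1 (segLoopB xs segs seg).2 := by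
  induction xs with
  | nil => intro segs seg; simp [segLoopB]
  | cons x xs ih =>
    intro segs seg
    simp only [List.cons_append, segLoopB]
    split <;> cases seg <;> simp [ih]

lemma segLoopB_seg_ne_nil (xs : List String) : ∀ segs (seg : Option (List String)),
    (∀ s, seg = some s → s ≠ []) →
    ∀ s, (segLoopB xs segs seg).2 = some s → s ≠ [] := by
  induction xs with
  | nil => intro segs seg h; simpa [segLoopB] using h
  | cons x xs ih =>
    intro segs seg h
    simp only [segLoopB]
    split <;> cases seg <;>
      refine ih _ _ ?_ <;> intro s hs <;> first
        | (cases hs; simp)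
        | simp at hs

lemma paraLoopB_spec (ls : List String) : ∀ (ps : List (List String)) (para : List String),
    (finishP (paraLoopB ls ps para)).flatMap segmentsB
      = ps.flatMap segmentsB ++ (segLoopB para [] none).1
          ++ sRec ls ((segLoopB para [] none).2.getD []) := by
  induction ls with
  | nil =>
    intro ps para
    have hne := segLoopB_seg_ne_nil para [] none (by intro s hs; simp at hs)
    by_cases hp : para = []
    · simp [paraLoopB, sRec, finishP, hp, segLoopB]
    · simp only [paraLoopB, sRec, finishP, if_neg hp]
      rw [List.flatMap_append]
      rcases hG : (segLoopB para [] none) with ⟨gsegs, gseg⟩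
      cases gseg with
      | none => simp [segmentsB, hG]
      | some s =>
        have hs : s ≠ [] := hne s (by rw [hG])
        simp [segmentsB, hG, hs]
  | cons l ls ih =>
    intro ps para
    have hne := segLoopB_seg_ne_nil para [] none (by intro s hs; simp at hs)
    rcases hG : (segLoopB para [] none) with ⟨gsegs, gseg⟩
    by_cases hl : l = ""
    · simp only [paraLoopB, sRec, hl, ne_eq, not_true_eq_false, if_false, if_true]
      by_cases hp : para = []
      · have h0 : segLoopB para [] none = ([], none) := by rw [hp]; rfl
        rw [hG] at h0
        injection h0 with e1 e2
        subst e1; subst e2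
        simp [hp, ih, segLoopB]
      · rw [if_neg hp, ih]
        rw [List.flatMap_append]
        cases gseg with
        | none => simp [segmentsB, hG, segLoopB]
        | some s =>
          have hs : s ≠ [] := hne s (by rw [hG])
          simp [segmentsB, hG, hs, segLoopB, List.append_assoc]
    · simp only [paraLoopB, sRec, hl, ne_eq, not_false_eq_true, if_true]
      rw [ih]
      have hstep : segLoopB (para ++ [l]) [] none = segLoopB [l] gsegs gseg := by
        rw [segLoopB_append, hG]
      by_cases he : PySem.Str.startswith l "Error:" = true
      · have he' : PySem.Chars.startswith l.toList ['E', 'r', 'r', 'o', 'r', ':'] = true := by simpa using he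
        cases gseg with
        | none => simp [hstep, segLoopB, he', List.append_assoc]
        | some s =>
          have hs : s ≠ [] := hne s (by rw [hG])
          simp [hstep, segLoopB, he', hs, List.append_assoc]
      · have he' : PySem.Chars.startswith l.toList ['E', 'r', 'r', 'o', 'r', ':'] = false := by simpa using he
        cases gseg with
        | none => simp [hstep, segLoopB, he']
        | some s =>
          have hs : s ≠ [] := hne s (by rw [hG])
          simp [hstep, segLoopB, he', hs]

lemma foldl_segs (ps : List (List String)) :
    ps.foldl (fun bs p => bs ++ segmentsB p) [] = ps.flatMap segmentsB := by
  simpa using PySem.List.foldl_append_eq_flatMap segmentsB ps []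

-- ===== VERDICT (by name: the statement is the Claim_ definition above) =====
theorem iter_error_blocks_py_spec : Claim_equal_iter_error_blocks_py := by
  intro s _
  unfold Spec_iter_error_blocks_py iter_error_blocks_py iter_error_blocks_py_alt paragraphsB
  rw [foldl_segs]
  show (match loopA (((PySem.Str.split? (PySem.Str.replace s "\r\n" "\n") "\n").getD []).map PySem.Str.rstrip) [] [] with
        | (blocks, current) => if current = [] then blocks else blocks ++ [current])
      = List.flatMap segmentsB
          (match paraLoopB (((PySem.Str.split? (PySem.Str.replace s "\r\n" "\n") "\n").getD []).map PySem.Str.rstrip) [] [] with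
           | (ps, para) => if para = [] then ps else ps ++ [para])
  have e1 : ∀ p : List (List String) × List String,
      (match p with | (b, c) => if c = [] then b else b ++ [c]) = finishP p := by
    rintro ⟨b, c⟩; rfl
  rw [e1, e1, loopA_spec, paraLoopB_spec]
  simp [segLoopB]
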